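-- pv_equiv track=rewrite | github.com/sibyllinesoft/scribe | packrepo/evaluator/statistics/fdr.py | _auto_detect_families
-- ===== SOURCE A (Python) =====
-- from typing import Dict, List, Optional, Tuple, Union, Any, Set
--
-- def _auto_detect_families(test_results: List[Dict[str, Any]]) -> Dict[str, str]:
--     """
--     Automatically detect metric families from test metadata.
--
--     Groups similar metrics together for family-wise FDR control.
--     """
--     families = {}
--
--     for i, test in enumerate(test_results):
--         test_id = test.get("test_id", f"test_{i}")
--         metric_name = test.get("metric_name", "unknown")
--
--         # Define family based on metric type
--         if "accuracy" in metric_name.lower() or "qa_" in metric_name.lower():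
--             family = "qa_accuracy"
--         elif "efficiency" in metric_name.lower() or "token" in metric_name.lower():
--             family = "token_efficiency"
--         elif "latency" in metric_name.lower() or "time" in metric_name.lower():
--             family = "performance_latency"
--         elif "memory" in metric_name.lower() or "ram" in metric_name.lower():
--             family = "performance_memory"
--         else:
--             family = "other_metrics"
--
--         families[test_id] = family
--
--     return families
-- ===== SOURCE B (Python) =====
-- from typing import Dict, List, Any
--
--
-- def _auto_detect_families(test_results: List[Dict[str, Any]]) -> Dict[str, str]:
--     # Staged overwrite passes: start everything as "other_metrics", then sweep the
--     # whole label list once per family in REVERSE priority order, overwriting matches,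
--     # so the highest-priority family is applied last and wins.
--     ids = [t.get("test_id", f"test_{i}") for i, t in enumerate(test_results)]
--     names = [t.get("metric_name", "unknown").lower() for t in test_results]
--     fams = ["other_metrics"] * len(names)
--     for kw1, kw2, fam in (
--         ("memory", "ram", "performance_memory"),
--         ("latency", "time", "performance_latency"),
--         ("efficiency", "token", "token_efficiency"),
--         ("accuracy", "qa_", "qa_accuracy"),
--     ):
--         fams = [fam if kw1 in n or kw2 in n else f for f, n in zip(fams, names)]
--     families = {}
--     for tid, fam in zip(ids, fams):
--         families[tid] = fam
--     return families
-- ===== Notes on version B (the rewrite author's own statement) =====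
-- stated objective: alternative
-- what changed: Instead of classifying each record once with a first-match keyword ladder, B makes staged full-list passes: it initializes every test to 'other_metrics', then sweeps the whole list once per family in reverse priority order overwriting matches (so the highest-priority family is written last), and finally zips ids with the computed labels into the dict.
import Mathlib
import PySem

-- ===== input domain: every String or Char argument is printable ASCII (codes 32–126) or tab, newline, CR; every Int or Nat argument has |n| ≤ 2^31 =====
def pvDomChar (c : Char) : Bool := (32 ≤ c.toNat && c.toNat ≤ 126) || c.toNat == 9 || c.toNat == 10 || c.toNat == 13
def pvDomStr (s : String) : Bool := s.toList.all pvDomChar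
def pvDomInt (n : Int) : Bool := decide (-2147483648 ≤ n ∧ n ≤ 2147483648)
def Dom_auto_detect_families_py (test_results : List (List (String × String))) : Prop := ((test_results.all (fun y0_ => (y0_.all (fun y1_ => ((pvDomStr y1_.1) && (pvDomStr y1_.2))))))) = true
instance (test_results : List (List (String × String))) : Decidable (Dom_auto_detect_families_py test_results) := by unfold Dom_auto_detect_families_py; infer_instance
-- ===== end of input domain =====

-- B replaces A's per-record first-match keyword ladder by staged whole-list passes:
-- every test starts as "other_metrics" and each family, in reverse priority order,
-- sweeps the list and overwrites its matches (alternative decomposition, same cost).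

-- ===== PORT A =====
def auto_detect_families_py (test_results : List (List (String × String))) : List (String × String) :=
  ((PySem.List.enumerate test_results 0).foldl
    (fun (families : PySem.Dict String String) p =>
      let test := PySem.Dict.ofList p.2
      let test_id := PySem.Dict.getD test "test_id" ("test_" ++ PySem.Int.toStr p.1)
      let metric_name := PySem.Dict.getD test "metric_name" "unknown"
      let family :=
        if PySem.Str.isIn "accuracy" (PySem.Str.lower metric_name) || PySem.Str.isIn "qa_" (PySem.Str.lower metric_name) then "qa_accuracy"
        else if PySem.Str.isIn "efficiency" (PySem.Str.lower metric_name) || PySem.Str.isIn "token" (PySem.Str.lower metric_name) then "token_efficiency"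
        else if PySem.Str.isIn "latency" (PySem.Str.lower metric_name) || PySem.Str.isIn "time" (PySem.Str.lower metric_name) then "performance_latency"
        else if PySem.Str.isIn "memory" (PySem.Str.lower metric_name) || PySem.Str.isIn "ram" (PySem.Str.lower metric_name) then "performance_memory"
        else "other_metrics"
      families.insert test_id family)
    PySem.Dict.empty).items

-- ===== PORT B =====
-- the reverse-priority rule tuple of Source B
def pvRevRules : List (String × String × String) :=
  [("memory", "ram", "performance_memory"),
   ("latency", "time", "performance_latency"),
   ("efficiency", "token", "token_efficiency"),
   ("accuracy", "qa_", "qa_accuracy")]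

def auto_detect_families_py_alt (test_results : List (List (String × String))) : List (String × String) :=
  let ids := (PySem.List.enumerate test_results 0).map
    (fun p => PySem.Dict.getD (PySem.Dict.ofList p.2) "test_id" ("test_" ++ PySem.Int.toStr p.1))
  let names := test_results.map
    (fun t => PySem.Str.lower (PySem.Dict.getD (PySem.Dict.ofList t) "metric_name" "unknown"))
  let fams0 := List.replicate names.length "other_metrics"
  let fams := pvRevRules.foldl
    (fun fams r =>
      List.zipWith (fun f n => if PySem.Str.isIn r.1 n || PySem.Str.isIn r.2.1 n then r.2.2 else f) fams names)
    fams0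
  ((ids.zip fams).foldl (fun (d : PySem.Dict String String) q => d.insert q.1 q.2) PySem.Dict.empty).items

-- ===== PRECONDITION & SPEC =====
def Spec_auto_detect_families_py (test_results : List (List (String × String))) (out : List (String × String)) : Prop := out = auto_detect_families_py_alt test_results
instance (test_results : List (List (String × String))) (out : List (String × String)) : Decidable (Spec_auto_detect_families_py test_results out) := by unfold Spec_auto_detect_families_py; infer_instance

-- ===== CLAIM =====
def Claim_equal_auto_detect_families_py : Prop := ∀ (test_results : List (List (String × String))), Dom_auto_detect_families_py test_results → Spec_auto_detect_families_py test_results (auto_detect_families_py test_results)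

-- ===== LEMMAS AND PROOFS =====
-- zipWith against a mapped copy of the same list acts pointwise
theorem pv_zipWith_map_self {α β : Type} (f : β → α → β) (h : α → β) (l : List α) :
    List.zipWith f (l.map h) l = l.map (fun n => f (h n) n) := by
  induction l with
  | nil => rfl
  | cons x xs ih => simp [ih]

-- mapping over a list is mapping the second components of its enumeration
theorem pv_map_enum {α β : Type} (f : α → β) (l : List α) (s : Int) :
    l.map f = (PySem.List.enumerate l s).map (fun p => f p.2) := by
  induction l generalizing s with
  | nil => rfl
  | cons x xs ih => rw [PySem.List.enumerate_cons]; simp only [List.map]; rw [← ih]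

-- fold of insertions over a zip of two maps over the same list is a single fold
theorem pv_zip_fold {α β γ δ : Type} (fI : α → β) (fN : α → γ) (ins : δ → β × γ → δ) (d : δ) (e : List α) :
    ((e.map fI).zip (e.map fN)).foldl ins d = e.foldl (fun d p => ins d (fI p, fN p)) d := by
  simp [List.zip_map', List.foldl_map]

-- ===== VERDICT =====
theorem auto_detect_families_py_spec : Claim_equal_auto_detect_families_py := by
  intro tr _
  unfold Spec_auto_detect_families_py auto_detect_families_py auto_detect_families_py_alt
  simp only [← List.map_const', pv_zipWith_map_self, pvRevRules, List.foldl_cons, List.foldl_nil]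
  rw [pv_map_enum (fun t => PySem.Str.lower (PySem.Dict.getD (PySem.Dict.ofList t) "metric_name" "unknown")) tr 0,
      List.map_map, pv_zip_fold]
  rfl
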